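-- pv_equiv track=rewrite | github.com/djs99/diags | cli/test/base.py | table_columns
-- ===== SOURCE A (Python) =====
-- def table_columns(first_table_row):
--     """Find column ranges in output line.
--
--     Return list of tuples (start,end) for each column detected by
--     plus (+) characters in delimiter line.
--     """
--     positions = []
--     start = 1  # there is '+' at 0
--     while start < len(first_table_row):
--         end = first_table_row.find('+', start)
--         if end == -1:
--             break
--         positions.append((start, end))
--         start = end + 1
--     return positions
-- ===== SOURCE B (Python) =====
-- def table_columns(first_table_row):
--     """Find column ranges in output line.
--
--     Return list of tuples (start,end) for each column detected by
--     plus (+) characters in delimiter line.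
--     """
--     pluses = [i for i, c in enumerate(first_table_row) if c == '+' and i >= 1]
--     bounds = [0] + pluses
--     return [(bounds[k] + 1, bounds[k + 1]) for k in range(len(bounds) - 1)]
-- ===== Notes on version B (the rewrite author's own statement) =====
-- stated objective: alternative
-- what changed: Replaces the cursor loop of repeated str.find calls with one enumerate pass that materialises all '+' indices (>= 1), then pairs consecutive boundaries of [0]+pluses in a second comprehension.
import Mathlib
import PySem

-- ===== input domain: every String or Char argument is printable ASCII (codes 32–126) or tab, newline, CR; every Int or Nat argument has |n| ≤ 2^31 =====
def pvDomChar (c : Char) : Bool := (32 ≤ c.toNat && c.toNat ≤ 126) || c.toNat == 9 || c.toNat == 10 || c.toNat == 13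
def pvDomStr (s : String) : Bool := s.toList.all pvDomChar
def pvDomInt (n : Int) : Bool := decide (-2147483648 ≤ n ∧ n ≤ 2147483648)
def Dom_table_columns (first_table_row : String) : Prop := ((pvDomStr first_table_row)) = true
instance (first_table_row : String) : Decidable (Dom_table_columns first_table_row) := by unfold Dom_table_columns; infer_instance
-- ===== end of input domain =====

-- B replaces A's cursor loop of repeated find calls by one enumerate pass collecting all
-- '+' indices ≥ 1 and a second pass pairing consecutive boundaries (objective: alternative).

-- ===== PORT A =====
-- A's while loop: cursor `start` threaded through repeated str.find('+', start) calls.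
-- Python's `start` is an int that stays ≥ 1 throughout, so it is carried as a Nat and
-- cast where A uses it as a value; `end` stays the Int str.find returns.
def tcLoopA (s : List Char) (start : Nat) (positions : List (Int × Int)) :
    List (Int × Int) :=
  if h : start < s.length then
    let e := PySem.Chars.findFrom s ['+'] (start : Int) none
    if he : e = -1 then positions
    else tcLoopA s (e.toNat + 1) (positions ++ [((start : Int), e)])
  else positions
termination_by s.length - start
decreasing_by
  have hspec := PySem.Chars.findFrom_natCast_spec s ['+'] start (Nat.le_of_lt h) he
  omega

def table_columns (first_table_row : String) : List (Int × Int) :=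
  tcLoopA first_table_row.toList 1 []

-- ===== PORT B =====
def table_columns_alt (first_table_row : String) : List (Int × Int) :=
  let pluses : List Int :=
    ((PySem.List.enumerate first_table_row.toList 0).filter
        (fun p => p.2 == '+' && 1 ≤ p.1)).map (·.1)
  let bounds : List Int := 0 :: pluses
  (PySem.List.pyRange 0 ((bounds.length : Int) - 1) 1).map
    (fun k => (PySem.List.pyGetD bounds k 0 + 1, PySem.List.pyGetD bounds (k + 1) 0))

-- ===== PRECONDITION & SPEC =====
def Spec_table_columns (first_table_row : String) (out : List (Int × Int)) : Prop := out = table_columns_alt first_table_row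
instance (first_table_row : String) (out : List (Int × Int)) : Decidable (Spec_table_columns first_table_row out) := by unfold Spec_table_columns; infer_instance

-- ===== CLAIM (what is proved, stated in full; the proofs are below) =====
def Claim_equal_table_columns : Prop := ∀ (first_table_row : String), Dom_table_columns first_table_row → Spec_table_columns first_table_row (table_columns first_table_row)

-- ===== LEMMAS AND PROOFS =====

-- common abstraction: consecutive-boundary pairing, and the '+' indices ≥ start
def pairUp : List Int → List (Int × Int)
  | [] => []
  | [_] => []
  | b1 :: b2 :: rest => (b1 + 1, b2) :: pairUp (b2 :: rest)

def plusesGE (s : List Char) (start : Nat) : List Int :=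
  (List.range s.length).filterMap
    (fun i => if start ≤ i ∧ s.getD i ' ' = '+' then some (i : Int) else none)

theorem plusesGE_nil (s : List Char) (start : Nat)
    (h : ∀ i, start ≤ i → i < s.length → s.getD i ' ' ≠ '+') :
    plusesGE s start = [] := by
  unfold plusesGE
  rw [List.filterMap_eq_nil_iff]
  intro i hi
  have hlt : i < s.length := List.mem_range.mp hi
  split_ifs with hc
  · exact absurd hc.2 (h i hc.1 hlt)
  · rfl

theorem plusesGE_cons (s : List Char) (start m : Nat)
    (h1 : start ≤ m) (h2 : m < s.length) (h3 : s.getD m ' ' = '+')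
    (h4 : ∀ i, start ≤ i → i < m → s.getD i ' ' ≠ '+') :
    plusesGE s start = (m : Int) :: plusesGE s (m + 1) := by
  unfold plusesGE
  have hlen : s.length = (m + 1) + (s.length - (m + 1)) := by omega
  rw [hlen, List.range_add, List.filterMap_append, List.filterMap_append]
  have hfirst1 :
      (List.range (m + 1)).filterMap
        (fun i => if start ≤ i ∧ s.getD i ' ' = '+' then some (i : Int) else none)
        = [(m : Int)] := by
    rw [List.range_succ, List.filterMap_append]
    have hnil : (List.range m).filterMap
        (fun i => if start ≤ i ∧ s.getD i ' ' = '+' then some (i : Int) else none) = [] := by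
      rw [List.filterMap_eq_nil_iff]
      intro i hi
      have him : i < m := List.mem_range.mp hi
      split_ifs with hc
      · exact absurd hc.2 (h4 i hc.1 him)
      · rfl
    rw [hnil]
    simp only [List.nil_append, List.filterMap_cons, List.filterMap_nil]
    rw [if_pos ⟨h1, h3⟩]
  have hfirst2 :
      (List.range (m + 1)).filterMap
        (fun i => if m + 1 ≤ i ∧ s.getD i ' ' = '+' then some (i : Int) else none)
        = [] := by
    rw [List.filterMap_eq_nil_iff]
    intro i hi
    have him : i < m + 1 := List.mem_range.mp hi
    split_ifs with hc
    · omega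
    · rfl
  have hrest :
      ((List.range (s.length - (m + 1))).map (fun x => (m + 1) + x)).filterMap
        (fun i => if start ≤ i ∧ s.getD i ' ' = '+' then some (i : Int) else none)
        = ((List.range (s.length - (m + 1))).map (fun x => (m + 1) + x)).filterMap
        (fun i => if m + 1 ≤ i ∧ s.getD i ' ' = '+' then some (i : Int) else none) := by
    apply List.filterMap_congr
    intro i hi
    obtain ⟨j, _, rfl⟩ := List.mem_map.mp hi
    have hs : start ≤ m + 1 + j := by omega
    have hm : m + 1 ≤ m + 1 + j := by omega
    simp only [hs, hm, true_and]
  rw [hfirst1, hfirst2, hrest]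
  simp

-- singleton prefix/infix characterisations
theorem singleton_prefix_iff {a : Char} {l : List Char} :
    [a] <+: l ↔ l.head? = some a := by
  cases l with
  | nil => simp
  | cons x xs =>
    constructor
    · rintro ⟨t, ht⟩
      simp at ht
      simp [ht.1]
    · intro h
      simp at h
      exact ⟨xs, by simp [h]⟩

theorem singleton_infix_iff {a : Char} {l : List Char} :
    [a] <:+: l ↔ a ∈ l := by
  constructor
  · intro h
    exact List.singleton_sublist.mp h.sublist
  · intro h
    obtain ⟨u, v, rfl⟩ := List.append_of_mem h
    exact ⟨u, v, by simp⟩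

theorem getD_eq_plus_iff (s : List Char) (i : Nat) (hi : i < s.length) :
    s.getD i ' ' = '+' ↔ [('+' : Char)] <+: s.drop i := by
  rw [singleton_prefix_iff, List.head?_drop]
  rw [List.getD_eq_getElem?_getD, List.getElem?_eq_getElem hi]
  simp

-- the A-loop computes pairUp of the boundary list
theorem tcLoopA_eq (s : List Char) :
    ∀ n start acc, s.length - start ≤ n → 1 ≤ start →
      tcLoopA s start acc = acc ++ pairUp (((start : Int) - 1) :: plusesGE s start) := by
  intro n
  induction n with
  | zero =>
    intro start acc hn h1
    have hlen : s.length ≤ start := by omega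
    rw [tcLoopA]
    simp only [dif_neg (by omega : ¬ start < s.length)]
    rw [plusesGE_nil s start (fun i hi hlt => by omega)]
    simp [pairUp]
  | succ n ih =>
    intro start acc hn h1
    rw [tcLoopA]
    by_cases h : start < s.length
    · simp only [dif_pos h]
      set e := PySem.Chars.findFrom s ['+'] (start : Int) none with he_def
      by_cases he : e = -1
      · simp only [dif_pos he]
        have hno := (PySem.Chars.findFrom_natCast_eq_neg_one_iff s ['+'] start
          (Nat.le_of_lt h)).mp he
        have hnil : plusesGE s start = [] := by
          apply plusesGE_nil
          intro i hi hlt hplus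
          apply hno
          rw [singleton_infix_iff]
          have : ('+' : Char) ∈ s.drop i := by
            have := (getD_eq_plus_iff s i hlt).mp hplus
            exact List.singleton_sublist.mp this.sublist
          have hdd : s.drop i = (s.drop start).drop (i - start) := by
            rw [List.drop_drop]; congr 1; omega
          rw [hdd] at this
          exact List.mem_of_mem_drop this
        rw [hnil]
        simp [pairUp]
      · simp only [dif_neg he]
        obtain ⟨hle, hpre, hmin⟩ :=
          PySem.Chars.findFrom_natCast_spec s ['+'] start (Nat.le_of_lt h) he
        have he0 : 0 ≤ e := by omega
        have hm2 : e.toNat < s.length := by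
          rcases hpre with ⟨t, ht⟩
          have := congrArg List.length ht
          simp at this
          omega
        have hm1 : start ≤ e.toNat := by omega
        have hm3 : s.getD e.toNat ' ' = '+' := by
          rw [getD_eq_plus_iff s e.toNat hm2]; exact hpre
        have hm4 : ∀ i, start ≤ i → i < e.toNat → s.getD i ' ' ≠ '+' := by
          intro i hi hlt hplus
          exact hmin i hi hlt ((getD_eq_plus_iff s i (by omega)).mp hplus)
        have hee : ((e.toNat : Nat) : Int) = e := by omega
        rw [plusesGE_cons s start e.toNat hm1 hm2 hm3 hm4, hee]
        rw [ih (e.toNat + 1) (acc ++ [((start : Int), e)]) (by omega) (by omega)]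
        have hcast : ((e.toNat + 1 : Nat) : Int) - 1 = e := by omega
        rw [hcast]
        simp [pairUp]
    · simp only [dif_neg h]
      rw [plusesGE_nil s start (fun i hi hlt => by omega)]
      simp [pairUp]

-- filter-then-map as filterMap
theorem filter_map_eq_filterMap {α β : Type} (p : α → Bool) (f : α → β) (l : List α) :
    (l.filter p).map f = l.filterMap (fun x => if p x then some (f x) else none) := by
  induction l with
  | nil => rfl
  | cons x xs ih =>
    by_cases h : p x
    · simp [List.filter_cons, List.filterMap_cons, h, ih]
    · simp [List.filter_cons, List.filterMap_cons, h, ih]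

-- B's first pass computes plusesGE s 1
theorem pluses_eq (s : List Char) :
    ((PySem.List.enumerate s 0).filter (fun p => p.2 == '+' && 1 ≤ p.1)).map (·.1)
      = plusesGE s 1 := by
  rw [PySem.List.enumerate_eq_map_pyRange s ' ', List.filter_map, List.map_map]
  rw [PySem.List.pyRange_one, List.filter_map, List.map_map]
  rw [filter_map_eq_filterMap]
  unfold plusesGE
  have hlen : ((PySem.List.len s : Int) - 0).toNat = s.length := by
    simp [PySem.List.len_eq]
  rw [hlen]
  apply List.filterMap_congr
  intro i _
  simp only [Function.comp_apply, zero_add, PySem.List.pyGetD_natCast]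
  by_cases h1 : 1 ≤ i
  · by_cases h2 : s.getD i ' ' = '+'
    · simp [h1, h2]
    · simp [h1, h2]
  · simp [h1, (by omega : ¬ (1 : Int) ≤ (i : Int)), (by omega : ¬ (1 ≤ i ∧ s.getD i ' ' = '+'))]

-- B's second pass is pairUp (Nat-range form)
theorem range_pair_eq_pairUp : ∀ l : List Int,
    (List.range (l.length - 1)).map (fun k => (l.getD k 0 + 1, l.getD (k + 1) 0)) = pairUp l
  | [] => rfl
  | [a] => rfl
  | a :: b :: rest => by
    have ih := range_pair_eq_pairUp (b :: rest)
    simp only [List.length_cons, Nat.add_sub_cancel] at ih ⊢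
    rw [List.range_succ_eq_map, List.map_cons, List.map_map]
    show _ :: _ = (a + 1, b) :: pairUp (b :: rest)
    simp only [List.getD_cons_zero, List.getD_cons_succ, Function.comp_def,
      Nat.succ_eq_add_one]
    exact congrArg (List.cons _) ih

theorem table_columns_alt_eq (s : String) :
    table_columns_alt s = pairUp (0 :: plusesGE s.toList 1) := by
  simp only [table_columns_alt]
  rw [pluses_eq]
  set bounds : List Int := 0 :: plusesGE s.toList 1 with hb
  rw [PySem.List.pyRange_one]
  rw [List.map_map]
  have hlen : (((bounds.length : Int) - 1) - 0).toNat = bounds.length - 1 := by omega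
  rw [hlen]
  rw [← range_pair_eq_pairUp bounds]
  apply List.map_congr_left
  intro k _
  simp only [Function.comp_apply, zero_add]
  have h1 : PySem.List.pyGetD bounds ((k : Int)) 0 = bounds.getD k 0 :=
    PySem.List.pyGetD_natCast bounds k 0
  have h2 : PySem.List.pyGetD bounds ((k : Int) + 1) 0 = bounds.getD (k + 1) 0 := by
    have : ((k : Int)) + 1 = ((k + 1 : Nat) : Int) := by push_cast; ring
    rw [this, PySem.List.pyGetD_natCast]
  rw [h1, h2]

-- ===== VERDICT (by name: the statement is the Claim_ definition above) =====
theorem table_columns_spec : Claim_equal_table_columns := by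
  intro s _
  unfold Spec_table_columns
  unfold table_columns
  rw [tcLoopA_eq s.toList (s.toList.length) 1 [] (by omega) le_rfl]
  rw [table_columns_alt_eq]
  norm_num
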